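-- pv_equiv track=rewrite | github.com/xuthus/py-slurpers | src/slurpers.py | strip_illegal_chars_capitalize
-- ===== SOURCE A (Python) =====
-- def strip_illegal_chars_capitalize(s: str, illegal_chars: tuple = ('-', '.')):
--     res = ''
--     cap = False
--     for c in s:
--         if c in illegal_chars:
--             cap = True
--         else:
--             res = res + (c.upper() if cap else c)
--             cap = False
--     return res
-- ===== SOURCE B (Python) =====
-- def strip_illegal_chars_capitalize(s: str, illegal_chars: tuple = ('-', '.')):
--     ill = set(illegal_chars)
--     segs = []
--     cur = []
--     for c in s:
--         if c in ill:
--             segs.append(''.join(cur))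
--             cur = []
--         else:
--             cur.append(c)
--     segs.append(''.join(cur))
--     parts = [segs[0]]
--     for seg in segs[1:]:
--         if seg:
--             parts.append(seg[0].upper() + seg[1:])
--     return ''.join(parts)
-- ===== Notes on version B (the rewrite author's own statement) =====
-- stated objective: faster
-- what changed: Replaces the single pass with a carried capitalize-next flag and per-character string concatenation by a split-into-segments pass (maximal runs of illegal chars are split points) followed by a join that uppercases the first character of every non-first non-empty segment.
import Mathlib
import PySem

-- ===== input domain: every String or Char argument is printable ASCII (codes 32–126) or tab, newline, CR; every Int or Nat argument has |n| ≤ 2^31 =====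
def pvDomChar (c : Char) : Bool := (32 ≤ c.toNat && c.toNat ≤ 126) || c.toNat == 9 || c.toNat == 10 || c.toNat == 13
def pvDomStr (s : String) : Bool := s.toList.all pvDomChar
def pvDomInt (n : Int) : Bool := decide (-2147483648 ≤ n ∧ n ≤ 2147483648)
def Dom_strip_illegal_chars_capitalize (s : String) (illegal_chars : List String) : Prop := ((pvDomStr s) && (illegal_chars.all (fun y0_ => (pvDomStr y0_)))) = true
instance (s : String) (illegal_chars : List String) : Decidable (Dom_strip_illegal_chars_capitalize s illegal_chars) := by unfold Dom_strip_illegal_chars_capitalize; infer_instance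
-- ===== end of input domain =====

-- B replaces A's carried capitalize-flag single pass by split-into-segments then a capitalizing join; equal output (alternative decomposition).
-- ===== PORT A =====
-- for c in s: if c in illegal_chars: cap = True else: res += (c.upper() if cap else c); cap = False
def strip_illegal_chars_capitalize (s : String) (illegal_chars : List String) : String :=
  let st := s.toList.foldl (fun (st : List Char × Bool) c =>
      if illegal_chars.contains (String.singleton c) then (st.1, true)
      else (st.1 ++ [if st.2 then PySem.Chars.upperChar c else c], false))
    ([], false)
  String.ofList st.1

-- ===== PORT B =====
-- split pass: segs/cur accumulator; 'c in ill' is membership in the distinct elements of illegal_chars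
def pvSplitB (s : String) (illegal_chars : List String) : List (List Char) :=
  let ill := PySem.Set.ofList illegal_chars
  let st := s.toList.foldl (fun (st : List (List Char) × List Char) c =>
      if PySem.Set.contains ill (String.singleton c) then (st.1 ++ [st.2], [])
      else (st.1, st.2 ++ [c]))
    ([], [])
  st.1 ++ [st.2]

-- join pass: first segment verbatim; each later non-empty segment with its head uppercased (seg[0].upper() + seg[1:])
def strip_illegal_chars_capitalize_alt (s : String) (illegal_chars : List String) : String :=
  match pvSplitB s illegal_chars with
  | [] => ""            -- unreachable: pvSplitB always returns a non-empty list
  | h :: t =>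
    String.ofList (t.foldl (fun acc seg =>
      match seg with
      | [] => acc
      | c :: cs => acc ++ (PySem.Chars.upperChar c :: cs)) h)

-- ===== PRECONDITION & SPEC =====
def Spec_strip_illegal_chars_capitalize (s : String) (illegal_chars : List String) (out : String) : Prop := out = strip_illegal_chars_capitalize_alt s illegal_chars
instance (s : String) (illegal_chars : List String) (out : String) : Decidable (Spec_strip_illegal_chars_capitalize s illegal_chars out) := by unfold Spec_strip_illegal_chars_capitalize; infer_instance

-- ===== CLAIM (what is proved, stated in full; the proofs are below) =====
def Claim_equal_strip_illegal_chars_capitalize : Prop := ∀ (s : String) (illegal_chars : List String), Dom_strip_illegal_chars_capitalize s illegal_chars → Spec_strip_illegal_chars_capitalize s illegal_chars (strip_illegal_chars_capitalize s illegal_chars)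

-- ===== LEMMAS AND PROOFS =====

-- recursive model of A's loop body (result chars produced from state cap)
def pvGoA (p : Char → Bool) : List Char → Bool → List Char
  | [], _ => []
  | c :: cs, cap =>
    if p c then pvGoA p cs true
    else (if cap then PySem.Chars.upperChar c else c) :: pvGoA p cs false

-- recursive splitter (prepends into the first segment)
def pvSplitR (p : Char → Bool) : List Char → List (List Char)
  | [] => [[]]
  | c :: cs =>
    if p c then [] :: pvSplitR p cs
    else match pvSplitR p cs with
      | [] => [[c]]
      | h :: t => (c :: h) :: t

def pvCapSeg : List Char → List Char
  | [] => []
  | c :: cs => PySem.Chars.upperChar c :: cs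

theorem pvSplitR_ne_nil (p : Char → Bool) (cs : List Char) : pvSplitR p cs ≠ [] := by
  cases cs with
  | nil => simp [pvSplitR]
  | cons c cs =>
    simp only [pvSplitR]
    split
    · simp
    · split <;> simp

theorem pvGoA_splitR (p : Char → Bool) (cs : List Char) :
    (pvGoA p cs false = (pvSplitR p cs).headI
        ++ ((pvSplitR p cs).tail.flatMap pvCapSeg))
    ∧ pvGoA p cs true = (pvSplitR p cs).flatMap pvCapSeg := by
  induction cs with
  | nil => simp [pvGoA, pvSplitR, pvCapSeg]
  | cons c cs ih =>
    by_cases h : p c = true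
    · simp [pvGoA, pvSplitR, h, ih.2, pvCapSeg]
    · rcases hs : pvSplitR p cs with _ | ⟨sh, st⟩
      · exact absurd hs (pvSplitR_ne_nil p cs)
      · have ih1 := ih.1; have ih2 := ih.2
        rw [hs] at ih1 ih2
        simp only [List.headI, List.tail] at ih1
        simp [pvGoA, pvSplitR, h, hs, ih1, pvCapSeg]

-- A's foldl accumulates acc ++ pvGoA
theorem pvFoldA (p : Char → Bool) (cs : List Char) (acc : List Char) (cap : Bool) :
    (cs.foldl (fun (st : List Char × Bool) c =>
        if p c then (st.1, true)
        else (st.1 ++ [if st.2 then PySem.Chars.upperChar c else c], false)) (acc, cap)).1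
      = acc ++ pvGoA p cs cap := by
  induction cs generalizing acc cap with
  | nil => simp [pvGoA]
  | cons c cs ih =>
    by_cases h : p c = true <;> simp [pvGoA, h, ih]

-- B's split foldl equals segsAcc ++ (cur prepended into pvSplitR's first segment)
theorem pvFoldSplit (p : Char → Bool) (cs : List Char) (segs : List (List Char)) (cur : List Char) :
    (let st := cs.foldl (fun (st : List (List Char) × List Char) c =>
        if p c then (st.1 ++ [st.2], []) else (st.1, st.2 ++ [c])) (segs, cur)
     st.1 ++ [st.2])
      = segs ++ (match pvSplitR p cs with
                 | [] => [cur]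
                 | h :: t => (cur ++ h) :: t) := by
  induction cs generalizing segs cur with
  | nil => simp [pvSplitR]
  | cons c cs ih =>
    by_cases h : p c = true
    · rcases hs : pvSplitR p cs with _ | ⟨sh, st⟩
      · exact absurd hs (pvSplitR_ne_nil p cs)
      · simp [pvSplitR, h, ih, hs]
    · rcases hs : pvSplitR p cs with _ | ⟨sh, st⟩
      · exact absurd hs (pvSplitR_ne_nil p cs)
      · simp [pvSplitR, h, ih, hs]

-- B's join foldl equals h ++ flatMap pvCapSeg t
theorem pvFoldJoin (t : List (List Char)) (h : List Char) :
    t.foldl (fun acc seg =>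
        match seg with
        | [] => acc
        | c :: cs => acc ++ (PySem.Chars.upperChar c :: cs)) h
      = h ++ t.flatMap pvCapSeg := by
  induction t generalizing h with
  | nil => simp
  | cons seg t ih =>
    cases seg with
    | nil => simp [ih, pvCapSeg]
    | cons c cs => simp [ih, pvCapSeg]

-- membership against the tuple and against its distinct elements agree
theorem pvMemEq (illegal_chars : List String) (c : Char) :
    PySem.Set.contains (PySem.Set.ofList illegal_chars) (String.singleton c)
      = illegal_chars.contains (String.singleton c) := by
  simp only [PySem.Set.contains_eq_listContains]
  simp [PySem.Set.mem_ofList]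

-- ===== VERDICT (by name: the statement is the Claim_ definition above) =====
theorem strip_illegal_chars_capitalize_spec : Claim_equal_strip_illegal_chars_capitalize := by
  intro s illegal_chars _
  unfold Spec_strip_illegal_chars_capitalize strip_illegal_chars_capitalize strip_illegal_chars_capitalize_alt pvSplitB
  set p : Char → Bool := fun c => illegal_chars.contains (String.singleton c) with hp
  have hmem : ∀ c, PySem.Set.contains (PySem.Set.ofList illegal_chars) (String.singleton c) = p c :=
    fun c => pvMemEq illegal_chars c
  have hsplit := pvFoldSplit p s.toList [] []
  simp only [hmem]
  rw [show (fun (st : List (List Char) × List Char) c =>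
        if p c = true then (st.1 ++ [st.2], ([] : List Char)) else (st.1, st.2 ++ [c]))
      = (fun st c => if p c then (st.1 ++ [st.2], []) else (st.1, st.2 ++ [c])) from rfl] at hsplit
  rw [hsplit]
  rcases hs : pvSplitR p s.toList with _ | ⟨sh, st⟩
  · exact absurd hs (pvSplitR_ne_nil p s.toList)
  · simp only [List.nil_append]
    rw [pvFoldA p s.toList [] false, pvFoldJoin]
    have := (pvGoA_splitR p s.toList).1
    rw [hs] at this
    simp only [List.headI, List.tail] at this
    simp [this]
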